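-- pv_equiv track=rewrite | github.com/ipsedigit/ipsedigit.github.io | ios.py | _pick_spotlight
-- ===== SOURCE A (Python) =====
-- SPOTLIGHT_KEYWORDS = [
--     'swift 6', 'swift 7', 'swift 8',
--     'xcode 16', 'xcode 17', 'xcode 18',
--     'ios 18', 'ios 19', 'ios 20',
--     'wwdc',
--     'swiftui',
-- ]
--
-- def _pick_spotlight(items):
--     """Pick the most relevant item as spotlight from apple_official items.
--
--     Prefers items whose title contains a SPOTLIGHT_KEYWORDS match.
--     Falls back to most recent item.
--     """
--     if not items:
--         return None
--     for kw in SPOTLIGHT_KEYWORDS: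
--         for item in items:
--             if kw in item["title"].lower():
--                 return item
--     return items[0]
-- ===== SOURCE B (Python) =====
-- SPOTLIGHT_KEYWORDS = [
--     'swift 6', 'swift 7', 'swift 8',
--     'xcode 16', 'xcode 17', 'xcode 18',
--     'ios 18', 'ios 19', 'ios 20',
--     'wwdc',
--     'swiftui',
-- ]
--
-- def _rank(title):
--     """Index of the first SPOTLIGHT_KEYWORDS entry contained in title, else len(SPOTLIGHT_KEYWORDS)."""
--     for i, kw in enumerate(SPOTLIGHT_KEYWORDS):
--         if kw in title:
--             return i
--     return len(SPOTLIGHT_KEYWORDS)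
--
-- def _pick_spotlight(items):
--     """Single pass: keep the item with the lowest keyword rank (strict improvement,
--     so the earliest item wins ties); unmatched items keep rank len(SPOTLIGHT_KEYWORDS),
--     leaving items[0] as the fallback."""
--     if not items:
--         return None
--     best = items[0]
--     best_rank = len(SPOTLIGHT_KEYWORDS)
--     for item in items:
--         rank = _rank(item["title"].lower())
--         if rank < best_rank:
--             best = item
--             best_rank = rank
--     return best
-- ===== Notes on version B (the rewrite author's own statement) =====
-- stated objective: alternative
-- what changed: A scans all items once per keyword (keyword-major nested loops, re-lowercasing every title each time); B makes a single item-major pass keeping an argmin accumulator of the best (lowest) keyword rank, lowercasing each title once, with strict-less updates so the earliest item wins ties.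
import Mathlib
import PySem

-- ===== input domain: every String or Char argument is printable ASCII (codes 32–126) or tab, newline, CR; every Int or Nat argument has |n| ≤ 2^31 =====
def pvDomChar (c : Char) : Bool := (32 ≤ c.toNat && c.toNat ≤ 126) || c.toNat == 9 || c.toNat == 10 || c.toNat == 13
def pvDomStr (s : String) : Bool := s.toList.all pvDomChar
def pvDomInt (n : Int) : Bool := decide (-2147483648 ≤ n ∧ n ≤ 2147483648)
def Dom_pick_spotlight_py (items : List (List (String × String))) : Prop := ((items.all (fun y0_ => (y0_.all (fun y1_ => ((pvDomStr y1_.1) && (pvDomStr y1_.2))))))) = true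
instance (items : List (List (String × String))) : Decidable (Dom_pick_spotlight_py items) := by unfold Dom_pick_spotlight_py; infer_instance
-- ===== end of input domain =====

-- B replaces A's keyword-major nested loops by a single item-major argmin pass over keyword ranks (alternative decomposition, same result).


-- ===== PORT A =====
def spotKeywords : List String :=
  ["swift 6", "swift 7", "swift 8",
   "xcode 16", "xcode 17", "xcode 18",
   "ios 18", "ios 19", "ios 20",
   "wwdc",
   "swiftui"]

-- item["title"].lower(); the getD default "" is never reached inside Pre_ (a missing "title" is Python's KeyError, excluded by Pre_)
def pvTitleLow (item : List (String × String)) : String :=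
  PySem.Str.lower ((PySem.Dict.mk item).getD "title" "")

-- inner loop of A: first item whose lowered title contains kw
def aFindItem (kw : String) (l : List (List (String × String))) : Option (List (String × String)) :=
  match l with
  | [] => none
  | item :: rest => if PySem.Str.isIn kw (pvTitleLow item) then some item else aFindItem kw rest

-- outer loop of A over the keywords
def aLoop (kws : List String) (items : List (List (String × String))) : Option (List (String × String)) :=
  match kws with
  | [] => none
  | kw :: rest =>
    match aFindItem kw items with
    | some item => some item
    | none => aLoop rest items

def pick_spotlight_py (items : List (List (String × String))) : Option (List (String × String)) :=
  match items with
  | [] => none                                  -- if not items: return None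
  | it0 :: _ =>
    match aLoop spotKeywords items with
    | some item => some item                    -- return item
    | none => some it0                          -- return items[0]

-- ===== PORT B =====
-- _rank: index of the first keyword contained in title, else the number of keywords
def bRank (kws : List String) (title : String) : Nat :=
  match kws with
  | [] => 0
  | kw :: rest => if PySem.Str.isIn kw title then 0 else bRank rest title + 1

-- single pass with an argmin accumulator; strict improvement only, so the earliest item wins ties
def bLoop (l : List (List (String × String))) (best : List (String × String)) (bestRank : Nat) :
    List (String × String) :=
  match l with
  | [] => best
  | item :: rest =>
    let rank := bRank spotKeywords (pvTitleLow item)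
    if rank < bestRank then bLoop rest item rank else bLoop rest best bestRank

def pick_spotlight_py_alt (items : List (List (String × String))) : Option (List (String × String)) :=
  match items with
  | [] => none
  | it0 :: _ => some (bLoop items it0 spotKeywords.length)

-- ===== PRECONDITION & SPEC =====
-- Pre_ excludes the inputs containing an item without a "title" key (outside the function's natural
-- domain): B always raises KeyError there, and A raises KeyError too unless a keyword match
-- happens to return before its scan reaches the malformed item.
def Pre_pick_spotlight_py (items : List (List (String × String))) : Prop :=
  ∀ it ∈ items, (PySem.Dict.mk it).contains "title" = true
instance (items : List (List (String × String))) : Decidable (Pre_pick_spotlight_py items) := by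
  unfold Pre_pick_spotlight_py; infer_instance

def pvWitness_pick_spotlight_py : (List (List (String × String))) :=
  [[("title", "Plain news")], [("title", "WWDC 2025 recap")]]

def Spec_pick_spotlight_py (items : List (List (String × String))) (out : Option (List (String × String))) : Prop := out = pick_spotlight_py_alt items
instance (items : List (List (String × String))) (out : Option (List (String × String))) : Decidable (Spec_pick_spotlight_py items out) := by unfold Spec_pick_spotlight_py; infer_instance

-- ===== CLAIM (what is proved, stated in full; the proofs are below) =====
def Claim_equal_pick_spotlight_py : Prop := ∀ (items : List (List (String × String))), Dom_pick_spotlight_py items → Pre_pick_spotlight_py items → Spec_pick_spotlight_py items (pick_spotlight_py items)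

-- ===== LEMMAS AND PROOFS =====

-- r it: the keyword rank B computes for an item
def pvR (it : List (String × String)) : Nat := bRank spotKeywords (pvTitleLow it)

theorem pvFminLeInit : ∀ (ns : List Nat) (b : Nat), ns.foldl min b ≤ b := by
  intro ns
  induction ns with
  | nil => intro b; simp
  | cons n rest ih =>
    intro b
    calc (n :: rest).foldl min b = rest.foldl min (min b n) := rfl
      _ ≤ min b n := ih _
      _ ≤ b := Nat.min_le_left _ _

theorem pvFminLeMem : ∀ (ns : List Nat) (b x : Nat), x ∈ ns → ns.foldl min b ≤ x := by
  intro ns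
  induction ns with
  | nil => intro b x hx; simp at hx
  | cons n rest ih =>
    intro b x hx
    rcases List.mem_cons.mp hx with h | h
    · subst h
      calc (x :: rest).foldl min b = rest.foldl min (min b x) := rfl
        _ ≤ min b x := pvFminLeInit _ _
        _ ≤ x := Nat.min_le_right _ _
    · exact ih _ _ h

-- the folded minimum is either the initial bound or attained in the list
theorem pvFminMemOr : ∀ (ns : List Nat) (b : Nat), ns.foldl min b = b ∨ ns.foldl min b ∈ ns := by
  intro ns
  induction ns with
  | nil => intro b; left; rfl
  | cons n rest ih =>
    intro b
    simp only [List.foldl_cons]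
    rcases ih (min b n) with h | h
    · rcases Nat.le_total b n with hbn | hnb
      · left; rw [h, Nat.min_eq_left hbn]
      · right; rw [h, Nat.min_eq_right hnb]; exact List.mem_cons_self
    · right; exact List.mem_cons_of_mem _ h

theorem pvFminShift : ∀ (ns : List Nat) (b : Nat),
    (ns.map (· + 1)).foldl min (b + 1) = ns.foldl min b + 1 := by
  intro ns
  induction ns with
  | nil => intro b; rfl
  | cons n rest ih =>
    intro b
    show (rest.map (· + 1)).foldl min (min (b + 1) (n + 1)) = rest.foldl min (min b n) + 1
    rw [show min (b + 1) (n + 1) = min b n + 1 by omega]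
    exact ih _

-- find? only looks at the predicate on members
theorem pvFindCongr {α : Type} (p q : α → Bool) :
    ∀ (l : List α), (∀ x ∈ l, p x = q x) → l.find? p = l.find? q := by
  intro l
  induction l with
  | nil => intro _; rfl
  | cons a rest ih =>
    intro h
    have ha := h a List.mem_cons_self
    by_cases hp : p a = true
    · rw [List.find?_cons_of_pos hp, List.find?_cons_of_pos (ha ▸ hp)]
    · rw [List.find?_cons_of_neg hp, List.find?_cons_of_neg (ha ▸ hp),
        ih (fun x hx => h x (List.mem_cons_of_mem _ hx))]

-- A's inner loop is find? over the same predicate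
theorem pvAFindEq (kw : String) : ∀ (l : List (List (String × String))),
    aFindItem kw l = l.find? (fun it => PySem.Str.isIn kw (pvTitleLow it)) := by
  intro l
  induction l with
  | nil => rfl
  | cons it rest ih =>
    by_cases h : PySem.Str.isIn kw (pvTitleLow it) = true
    · simp only [aFindItem]
      rw [if_pos h, List.find?_cons_of_pos (p := fun it => PySem.Str.isIn kw (pvTitleLow it)) h]
    · simp only [aFindItem]
      rw [if_neg h, List.find?_cons_of_neg (p := fun it => PySem.Str.isIn kw (pvTitleLow it)) h, ih]

-- no item beats the current bound: bLoop keeps its accumulator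
theorem pvBLoopNone : ∀ (l : List (List (String × String))) (best : List (String × String)) (br : Nat),
    (∀ x ∈ l, ¬ pvR x < br) → bLoop l best br = best := by
  intro l
  induction l with
  | nil => intro best br _; rfl
  | cons it rest ih =>
    intro best br h
    have hit : ¬ pvR it < br := h it List.mem_cons_self
    unfold pvR at hit
    simp only [bLoop]
    rw [if_neg hit]
    exact ih best br (fun x hx => h x (List.mem_cons_of_mem _ hx))

-- bLoop returns the first item achieving the overall minimum rank (when it improves on the bound)
theorem pvBLoopFind : ∀ (l : List (List (String × String))) (best tgt : List (String × String)) (br : Nat),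
    (l.map pvR).foldl min br < br →
    l.find? (fun x => decide (pvR x = (l.map pvR).foldl min br)) = some tgt →
    bLoop l best br = tgt := by
  intro l
  induction l with
  | nil => intro best tgt br hm hf; simp at hm
  | cons it rest ih =>
    intro best tgt br hm hf
    have hmle : (List.map pvR (it :: rest)).foldl min br ≤ pvR it :=
      pvFminLeMem _ _ _ (List.mem_map_of_mem List.mem_cons_self)
    simp only [List.map_cons, List.foldl_cons] at hm hmle hf
    by_cases heq : pvR it = (List.map pvR rest).foldl min (min br (pvR it))
    · -- head achieves the minimum: it is the target, and nothing later strictly improves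
      rw [List.find?_cons_of_pos (by simpa using heq)] at hf
      injection hf with hf; subst hf
      have hlt : pvR it < br := by omega
      have hlt' : bRank spotKeywords (pvTitleLow it) < br := hlt
      simp only [bLoop]
      rw [if_pos hlt']
      apply pvBLoopNone
      intro x hx
      have hxle : (List.map pvR rest).foldl min (min br (pvR it)) ≤ pvR x :=
        pvFminLeMem _ _ _ (List.mem_map_of_mem hx)
      have hb2 : pvR it = bRank spotKeywords (pvTitleLow it) := rfl
      omega
    · rw [List.find?_cons_of_neg (by simpa using heq)] at hf
      by_cases hlt : pvR it < br
      · -- improve the accumulator and recurse with bound pvR it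
        have hmin : min br (pvR it) = pvR it := Nat.min_eq_right (Nat.le_of_lt hlt)
        simp only [hmin] at hm hf heq hmle
        have hlt' : bRank spotKeywords (pvTitleLow it) < br := hlt
        simp only [bLoop]
        rw [if_pos hlt']
        exact ih it tgt (pvR it) (by omega) hf
      · -- keep the accumulator; the head does not affect the minimum
        have hmin : min br (pvR it) = br := Nat.min_eq_left (Nat.le_of_not_lt hlt)
        simp only [hmin] at hm hf
        have hlt' : ¬ bRank spotKeywords (pvTitleLow it) < br := hlt
        simp only [bLoop]
        rw [if_neg hlt']
        exact ih best tgt br hm hf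

-- no keyword matches anywhere: A's outer loop returns none
theorem pvALoopNone : ∀ (kws : List String) (l : List (List (String × String))),
    (∀ x ∈ l, ¬ bRank kws (pvTitleLow x) < kws.length) → aLoop kws l = none := by
  intro kws
  induction kws with
  | nil => intro l _; rfl
  | cons kw rest ih =>
    intro l h
    have hno : ∀ x ∈ l, ¬ PySem.Str.isIn kw (pvTitleLow x) = true := by
      intro x hx hmatch
      have hb := h x hx
      simp only [bRank, List.length_cons] at hb
      rw [if_pos hmatch] at hb
      omega
    have hfind : aFindItem kw l = none := by
      rw [pvAFindEq]
      exact List.find?_eq_none.mpr hno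
    simp only [aLoop, hfind]
    apply ih
    intro x hx
    have hb := h x hx
    simp only [bRank, List.length_cons] at hb
    rw [if_neg (hno x hx)] at hb
    omega

-- some keyword matches: A's outer loop returns the first item of minimal rank
theorem pvALoopFind : ∀ (kws : List String) (l : List (List (String × String))),
    (l.map (fun x => bRank kws (pvTitleLow x))).foldl min kws.length < kws.length →
    aLoop kws l = l.find? (fun x =>
      decide (bRank kws (pvTitleLow x) = (l.map (fun y => bRank kws (pvTitleLow y))).foldl min kws.length)) := by
  intro kws
  induction kws with
  | nil =>
    intro l hm
    exfalso
    have h0 := pvFminLeInit (l.map (fun x => bRank ([] : List String) (pvTitleLow x))) 0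
    simp only [List.length_nil] at hm
    omega
  | cons kw rest ih =>
    intro l hm
    by_cases hex : ∃ x ∈ l, PySem.Str.isIn kw (pvTitleLow x) = true
    · -- some item matches kw: the minimum is 0 and A returns the first kw-match
      obtain ⟨x0, hx0, hx0m⟩ := hex
      have hz : bRank (kw :: rest) (pvTitleLow x0) = 0 := by
        simp only [bRank]; rw [if_pos hx0m]
      have hm0 : (l.map (fun y => bRank (kw :: rest) (pvTitleLow y))).foldl min (kw :: rest).length = 0 := by
        have h1 := pvFminLeMem (l.map (fun y => bRank (kw :: rest) (pvTitleLow y)))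
          (kw :: rest).length (bRank (kw :: rest) (pvTitleLow x0)) (List.mem_map_of_mem hx0)
        rw [hz] at h1
        omega
      rw [hm0]
      have hpred : ∀ x : List (String × String),
          PySem.Str.isIn kw (pvTitleLow x) = decide (bRank (kw :: rest) (pvTitleLow x) = 0) := by
        intro x
        by_cases hmx : PySem.Str.isIn kw (pvTitleLow x) = true
        · simp only [bRank, if_pos hmx]
          rw [hmx]
          simp
        · simp only [bRank, if_neg hmx]
          rw [Bool.eq_false_iff.mpr hmx]
          symm
          exact decide_eq_false (by omega)
      have hsome : (l.find? (fun it => PySem.Str.isIn kw (pvTitleLow it))).isSome :=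
        List.find?_isSome.mpr ⟨x0, hx0, hx0m⟩
      obtain ⟨y, hy⟩ := Option.isSome_iff_exists.mp hsome
      have hy' : aFindItem kw l = some y := by rw [pvAFindEq]; exact hy
      simp only [aLoop, hy']
      exact ((pvFindCongr _ _ l (fun x _ => (hpred x).symm)).trans hy).symm
    · -- no item matches kw: shift every rank by one and use the IH on rest
      have hnom : ∀ x ∈ l, ¬ PySem.Str.isIn kw (pvTitleLow x) = true :=
        fun x hx h => hex ⟨x, hx, h⟩
      have hfind : aFindItem kw l = none := by
        rw [pvAFindEq]
        exact List.find?_eq_none.mpr hnom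
      have hstep : ∀ x ∈ l, bRank (kw :: rest) (pvTitleLow x) = bRank rest (pvTitleLow x) + 1 := by
        intro x hx
        simp only [bRank]
        rw [if_neg (hnom x hx)]
      have hshift : l.map (fun y => bRank (kw :: rest) (pvTitleLow y)) =
          (l.map (fun y => bRank rest (pvTitleLow y))).map (· + 1) := by
        rw [List.map_map]
        exact List.map_congr_left (fun x hx => hstep x hx)
      have hlen : ((kw :: rest) : List String).length = rest.length + 1 := rfl
      rw [hshift, hlen, pvFminShift] at hm ⊢
      have hm' : (l.map (fun y => bRank rest (pvTitleLow y))).foldl min rest.length < rest.length := by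
        omega
      simp only [aLoop, hfind]
      rw [ih l hm']
      apply pvFindCongr
      intro x hx
      rw [hstep x hx]
      exact (decide_eq_decide.mpr (by omega))

-- ===== VERDICT (by name: the statement is the Claim_ definition above) =====
theorem pick_spotlight_py_spec : Claim_equal_pick_spotlight_py := by
  intro items _ _
  unfold Spec_pick_spotlight_py
  match items with
  | [] => rfl
  | it0 :: rest =>
    simp only [pick_spotlight_py, pick_spotlight_py_alt]
    by_cases hm : ((it0 :: rest).map pvR).foldl min spotKeywords.length < spotKeywords.length
    · -- some keyword matches somewhere: both sides return the first item of minimal rank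
      have hfind : aLoop spotKeywords (it0 :: rest) = (it0 :: rest).find? (fun x =>
          decide (pvR x = ((it0 :: rest).map pvR).foldl min spotKeywords.length)) :=
        pvALoopFind spotKeywords (it0 :: rest) hm
      have hsome : ((it0 :: rest).find? (fun x =>
          decide (pvR x = ((it0 :: rest).map pvR).foldl min spotKeywords.length))).isSome := by
        apply List.find?_isSome.mpr
        rcases pvFminMemOr ((it0 :: rest).map pvR) spotKeywords.length with h | h
        · omega
        · obtain ⟨x, hx, hrx⟩ := List.mem_map.mp h
          exact ⟨x, hx, by simp [hrx]⟩
      obtain ⟨tgt, htgt⟩ := Option.isSome_iff_exists.mp hsome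
      rw [hfind, htgt, pvBLoopFind (it0 :: rest) it0 tgt spotKeywords.length hm htgt]
    · -- no keyword matches any item: A falls through to items[0], B never updates
      have hnone : aLoop spotKeywords (it0 :: rest) = none := by
        apply pvALoopNone
        intro x hx hlt
        have hle := pvFminLeMem ((it0 :: rest).map pvR) spotKeywords.length (pvR x)
          (List.mem_map_of_mem hx)
        have hlt2 : pvR x < spotKeywords.length := hlt
        exact hm (by omega)
      have hb : bLoop (it0 :: rest) it0 spotKeywords.length = it0 := by
        apply pvBLoopNone
        intro x hx hlt
        have hle := pvFminLeMem ((it0 :: rest).map pvR) spotKeywords.length (pvR x)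
          (List.mem_map_of_mem hx)
        exact hm (by omega)
      rw [hnone, hb]
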